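-- pv_equiv track=rewrite | github.com/myhsia/mkct4sys-bath | source/zenodo/src/liouvillian/utils.py | parse_reps
-- ===== SOURCE A (Python) =====
-- def parse_reps(m_list):
--     m_set = sorted(list(set(m_list)))
--     m_reps = [0] * len(m_set)
--     for ii, m in enumerate(m_set):
--         for mm in m_list:
--             if m == mm:
--                 m_reps[ii] += 1
--     return m_set, m_reps
-- ===== SOURCE B (Python) =====
-- def parse_reps(m_list):
--     m_set = []
--     m_reps = []
--     for x in sorted(m_list):
--         if m_set and m_set[-1] == x:
--             m_reps[-1] += 1
--         else:
--             m_set.append(x)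
--             m_reps.append(1)
--     return m_set, m_reps
-- ===== Notes on version B (the rewrite author's own statement) =====
-- stated objective: faster
-- what changed: Replaced the nested scan (for each distinct value, rescan the whole list to count it) by one sort of the input followed by a single run-length-grouping pass that emits each value and its count when the run ends.
import Mathlib
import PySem

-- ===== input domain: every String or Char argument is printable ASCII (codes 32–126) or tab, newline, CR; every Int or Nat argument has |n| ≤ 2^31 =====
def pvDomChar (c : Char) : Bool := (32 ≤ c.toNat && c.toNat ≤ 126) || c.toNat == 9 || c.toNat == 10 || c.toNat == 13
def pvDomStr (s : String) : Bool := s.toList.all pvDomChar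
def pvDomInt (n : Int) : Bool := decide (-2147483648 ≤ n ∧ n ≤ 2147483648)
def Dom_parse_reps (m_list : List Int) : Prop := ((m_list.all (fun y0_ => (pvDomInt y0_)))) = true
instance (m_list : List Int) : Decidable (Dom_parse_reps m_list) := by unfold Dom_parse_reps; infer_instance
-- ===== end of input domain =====

-- B sorts the list once and run-length-groups it in a single pass, instead of A's rescan of the whole list per distinct value.


-- ===== PORT A =====
def parse_reps (m_list : List Int) : List Int × List Int :=
  let m_set := PySem.List.sorted (PySem.Set.ofList m_list) (fun x => x) false
  let m_reps := List.replicate m_set.length (0 : Int)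
  let m_reps := (PySem.List.enumerate m_set 0).foldl
    (fun reps p =>
      m_list.foldl
        (fun reps mm =>
          if p.2 == mm then PySem.List.pySetD reps p.1 (PySem.List.pyGetD reps p.1 0 + 1) else reps)
        reps)
    m_reps
  (m_set, m_reps)

-- ===== PORT B =====
def parse_reps_alt (m_list : List Int) : List Int × List Int :=
  (PySem.List.sorted m_list (fun x => x) false).foldl
    (fun st x =>
      if (!st.1.isEmpty) && (PySem.List.pyGetD st.1 (-1) 0 == x)
      then (st.1, PySem.List.pySetD st.2 (-1) (PySem.List.pyGetD st.2 (-1) 0 + 1))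
      else (st.1 ++ [x], st.2 ++ [(1 : Int)]))
    ([], [])

-- ===== PRECONDITION & SPEC =====
def Spec_parse_reps (m_list : List Int) (out : List Int × List Int) : Prop := out = parse_reps_alt m_list
instance (m_list : List Int) (out : List Int × List Int) : Decidable (Spec_parse_reps m_list out) := by unfold Spec_parse_reps; infer_instance

-- ===== CLAIM (what is proved, stated in full; the proofs are below) =====
def Claim_equal_parse_reps : Prop := ∀ (m_list : List Int), Dom_parse_reps m_list → Spec_parse_reps m_list (parse_reps m_list)

-- ===== LEMMAS AND PROOFS =====

theorem set_getD_self (l : List Int) (n : Nat) (h : n < l.length) :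
    l.set n (l.getD n 0) = l := by
  induction l generalizing n with
  | nil => simp
  | cons a t ih =>
    cases n with
    | zero => simp
    | succ k => simp at h ⊢; exact ih k h

theorem getD_set_self (l : List Int) (n : Nat) (v : Int) (h : n < l.length) :
    (l.set n v).getD n 0 = v := by
  induction l generalizing n with
  | nil => simp at h
  | cons a t ih =>
    cases n with
    | zero => simp
    | succ k => simp at h ⊢; exact ih k h

theorem getD_append_at (pre rest : List Int) (c : Int) :
    (pre ++ c :: rest).getD pre.length 0 = c := by
  induction pre with
  | nil => simp
  | cons a t ih => simp

theorem set_append_at (pre rest : List Int) (c v : Int) :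
    (pre ++ c :: rest).set pre.length v = pre ++ v :: rest := by
  induction pre with
  | nil => simp
  | cons a t ih => simp [ih]

theorem pySetD_append_neg_one (r : List Int) (c w : Int) :
    PySem.List.pySetD (r ++ [c]) (-1) w = r ++ [w] := by
  simp [PySem.List.pySetD, PySem.List.pySet?, PySem.List.pyIdx?]

-- ------- A side -------
theorem innerA (l : List Int) (m : Int) (reps : List Int) (n : Nat) (h : n < reps.length) :
    l.foldl (fun reps mm => if m == mm then reps.set n (reps.getD n 0 + 1) else reps) reps
    = reps.set n (reps.getD n 0 + l.count m) := by
  induction l generalizing reps with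
  | nil => simpa using (set_getD_self reps n h).symm
  | cons mm t ih =>
    by_cases hm : m = mm
    · subst hm
      simp only [List.foldl_cons, beq_self_eq_true, if_true]
      rw [ih (reps.set n (reps.getD n 0 + 1)) (by simpa using h)]
      rw [List.set_set, getD_set_self reps n _ h, List.count_cons_self]
      congr 1
      push_cast
      omega
    · have hb : (m == mm) = false := by simp [hm]
      simp only [List.foldl_cons, hb, Bool.false_eq_true, if_false]
      rw [ih reps h, List.count_cons]
      have h2 : (mm == m) = false := by simp [Ne.symm hm]
      simp [h2]

theorem outerA (l : List Int) (tail : List Int) (pre : List Int) :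
    (PySem.List.enumerate tail (pre.length : Int)).foldl
      (fun reps p =>
        l.foldl
          (fun reps mm =>
            if p.2 == mm then PySem.List.pySetD reps p.1 (PySem.List.pyGetD reps p.1 0 + 1) else reps)
          reps)
      (pre ++ List.replicate tail.length 0)
    = pre ++ tail.map (fun m => (l.count m : Int)) := by
  induction tail generalizing pre with
  | nil => simp [PySem.List.enumerate]
  | cons m t ih =>
    rw [PySem.List.enumerate_cons, List.foldl_cons]
    have h1 : (pre ++ List.replicate (m :: t).length (0:Int)) = pre ++ (0:Int) :: List.replicate t.length 0 := by
      simp [List.replicate_succ]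
    rw [h1]
    simp only [PySem.List.pySetD_natCast, PySem.List.pyGetD_natCast]
    rw [innerA l m _ pre.length (by simp)]
    rw [getD_append_at, set_append_at]
    have h2 : pre ++ ((0 : Int) + (l.count m : Int)) :: List.replicate t.length 0
        = (pre ++ [(l.count m : Int)]) ++ List.replicate t.length 0 := by simp
    have h3 : ((pre.length : Int) + 1) = (((pre ++ [(l.count m : Int)]).length : Int)) := by simp
    rw [h2, h3, ih (pre ++ [(l.count m : Int)])]
    simp

theorem parse_reps_eq_canon (m_list : List Int) :
    parse_reps m_list =
      (PySem.List.sorted (PySem.Set.ofList m_list) (fun x => x) false,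
       (PySem.List.sorted (PySem.Set.ofList m_list) (fun x => x) false).map
         (fun m => (m_list.count m : Int))) := by
  unfold parse_reps
  have := outerA m_list (PySem.List.sorted (PySem.Set.ofList m_list) (fun x => x) false) []
  simpa using this

-- ------- B side -------
def stepB (st : List Int × List Int) (x : Int) : List Int × List Int :=
  if (!st.1.isEmpty) && (PySem.List.pyGetD st.1 (-1) 0 == x)
  then (st.1, PySem.List.pySetD st.2 (-1) (PySem.List.pyGetD st.2 (-1) 0 + 1))
  else (st.1 ++ [x], st.2 ++ [(1 : Int)])

theorem stepB_same (v r : List Int) (x c : Int) :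
    stepB (v ++ [x], r ++ [c]) x = (v ++ [x], r ++ [c + 1]) := by
  simp [stepB, PySem.List.pyGetD_neg_one_append_singleton, pySetD_append_neg_one]

theorem stepB_new (v r : List Int) (x c y : Int) (h : x ≠ y) :
    stepB (v ++ [x], r ++ [c]) y = ((v ++ [x]) ++ [y], (r ++ [c]) ++ [1]) := by
  simp [stepB, PySem.List.pyGetD_neg_one_append_singleton, h]

theorem absorbB (n : Nat) (x : Int) (rest v r : List Int) (c : Int) :
    (List.replicate n x ++ rest).foldl stepB (v ++ [x], r ++ [c])
    = rest.foldl stepB (v ++ [x], r ++ [c + n]) := by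
  induction n generalizing c with
  | zero => simp
  | succ k ih =>
    rw [List.replicate_succ, List.cons_append, List.foldl_cons, stepB_same, ih (c + 1)]
    have h' : c + 1 + (k : Int) = c + ((k + 1 : Nat) : Int) := by push_cast; ring
    rw [h']

theorem groupsB (u : List Int) (f : Int → Nat) (v r : List Int) (x c : Int)
    (hpos : ∀ m ∈ u, 1 ≤ f m) (hgt : ∀ m ∈ u, x < m) (hpair : u.Pairwise (· < ·)) :
    (u.flatMap (fun m => List.replicate (f m) m)).foldl stepB (v ++ [x], r ++ [c])
    = ((v ++ [x]) ++ u, (r ++ [c]) ++ u.map (fun m => (f m : Int))) := by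
  induction u generalizing v r x c with
  | nil => simp
  | cons m u' ih =>
    obtain ⟨k, hk⟩ : ∃ k, f m = k + 1 := by
      have := hpos m (by simp); exact ⟨f m - 1, by omega⟩
    rw [List.flatMap_cons, hk, List.replicate_succ, List.cons_append, List.append_assoc,
        List.foldl_cons, stepB_new v r x c m (ne_of_lt (hgt m (by simp))), absorbB]
    rw [ih (v ++ [x]) (r ++ [c]) m (1 + k)
        (fun a ha => hpos a (by simp [ha]))
        (fun a ha => (List.pairwise_cons.mp hpair).1 a ha)
        (List.pairwise_cons.mp hpair).2]
    have : ((1 : Int) + k) = ((f m : Nat) : Int) := by rw [hk]; push_cast; ring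
    simp [this]

theorem sum_map_ite_nodup (u : List Int) (a : Int) (g : Int → Nat) (h : u.Nodup) :
    (u.map (fun m => if m = a then g m else 0)).sum = if a ∈ u then g a else 0 := by
  induction u with
  | nil => simp
  | cons m u' ih =>
    rcases List.nodup_cons.mp h with ⟨hma, hu'⟩
    by_cases hm : m = a
    · subst hm
      have hz : ∀ b ∈ u'.map (fun m1 => if m1 = m then g m1 else 0), b = 0 := by
        intro b hb
        rcases List.mem_map.mp hb with ⟨m1, hm1, rfl⟩
        have : ¬ m1 = m := fun hq => hma (hq ▸ hm1)
        simp [this]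
      simp [hma, List.sum_eq_zero hz]
    · simp [hm, ih hu', Ne.symm hm]

theorem pairwise_le_flatMap (u : List Int) (g : Int → Nat) (hpair : u.Pairwise (· < ·)) :
    (u.flatMap (fun m => List.replicate (g m) m)).Pairwise (· ≤ ·) := by
  induction hpair with
  | nil => simp
  | @cons m u' hlt hp ih =>
    rw [List.flatMap_cons, List.pairwise_append]
    refine ⟨List.pairwise_replicate.mpr (Or.inr le_rfl), ih, ?_⟩
    intro a ha b hb
    rcases List.mem_flatMap.mp hb with ⟨m', hm', hbm⟩
    rw [List.eq_of_mem_replicate ha, List.eq_of_mem_replicate hbm]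
    exact le_of_lt (hlt m' hm')

theorem sorted_decomp (m_list : List Int) :
    PySem.List.sorted m_list (fun x => x) false
    = (PySem.List.sorted (PySem.Set.ofList m_list) (fun x => x) false).flatMap
        (fun m => List.replicate (m_list.count m) m) := by
  set u := PySem.List.sorted (PySem.Set.ofList m_list) (fun x => x) false with hu
  have hnodup : u.Nodup := (PySem.List.sorted_perm _ _ _).nodup_iff.mpr (PySem.Set.nodup_ofList m_list)
  have hmem : ∀ a, a ∈ u ↔ a ∈ m_list := by
    intro a; rw [hu, PySem.List.mem_sorted, PySem.Set.mem_ofList]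
  have hpair : u.Pairwise (· < ·) := PySem.List.sorted_ofList_pairwise_lt m_list
  apply PySem.List.sorted_id_eq_of_perm_of_pairwise
  · rw [List.perm_iff_count]
    intro a
    rw [List.count_flatMap]
    have : (List.map (List.count a ∘ fun m => List.replicate (m_list.count m) m) u).sum
        = (u.map (fun m => if m = a then m_list.count m else 0)).sum := by
      congr 1
      apply List.map_congr_left
      intro m _
      simp [Function.comp, List.count_replicate, beq_iff_eq]
    rw [this, sum_map_ite_nodup u a _ hnodup]
    by_cases ha : a ∈ u
    · simp [ha]
    · have : a ∉ m_list := fun hc => ha ((hmem a).mpr hc)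
      simp [ha, (List.count_eq_zero).mpr this]
  · exact pairwise_le_flatMap u _ hpair

theorem parse_reps_alt_eq_canon (m_list : List Int) :
    parse_reps_alt m_list =
      (PySem.List.sorted (PySem.Set.ofList m_list) (fun x => x) false,
       (PySem.List.sorted (PySem.Set.ofList m_list) (fun x => x) false).map
         (fun m => (m_list.count m : Int))) := by
  have halt : parse_reps_alt m_list
      = (PySem.List.sorted m_list (fun x => x) false).foldl stepB ([], []) := rfl
  rw [halt, sorted_decomp m_list]
  set u := PySem.List.sorted (PySem.Set.ofList m_list) (fun x => x) false with hu
  have hmem : ∀ a, a ∈ u ↔ a ∈ m_list := by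
    intro a; rw [hu, PySem.List.mem_sorted, PySem.Set.mem_ofList]
  have hpair : u.Pairwise (· < ·) := PySem.List.sorted_ofList_pairwise_lt m_list
  cases hcu : u with
  | nil => simp
  | cons m u' =>
    have hpos : ∀ a ∈ u, 1 ≤ m_list.count a := by
      intro a ha; exact List.count_pos_iff.mpr ((hmem a).mp ha)
    obtain ⟨k, hk⟩ : ∃ k, m_list.count m = k + 1 := by
      have := hpos m (by rw [hcu]; simp); exact ⟨m_list.count m - 1, by omega⟩
    rw [List.flatMap_cons, hk, List.replicate_succ, List.cons_append, List.foldl_cons]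
    have hstep : stepB ([], []) m = (([] : List Int) ++ [m], ([] : List Int) ++ [(1:Int)]) := by
      simp [stepB]
    rw [hstep, absorbB]
    have hpair' : (m :: u').Pairwise (· < ·) := hcu ▸ hpair
    rcases List.pairwise_cons.mp hpair' with ⟨hlt, hp'⟩
    rw [groupsB u' (fun a => m_list.count a) [] [] m (1 + k)
        (fun a ha => hpos a (by rw [hcu]; simp [ha])) hlt hp']
    have : ((1 : Int) + k) = ((m_list.count m : Nat) : Int) := by rw [hk]; push_cast; ring
    simp [this]

-- ===== VERDICT (by name: the statement is the Claim_ definition above) =====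
theorem parse_reps_spec : Claim_equal_parse_reps := by
  intro m_list _
  unfold Spec_parse_reps
  rw [parse_reps_eq_canon, parse_reps_alt_eq_canon]
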